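-- pv_equiv track=rewrite | github.com/AaronJi/RL | data/Letor/LectorDataDealer.py | getPartData
-- ===== SOURCE A (Python) =====
-- def getPartData(data, nQuery, nNegDoc, nPosDoc):
--     partial_data = {}
--
--     queries = data.keys()
--
--     for iq, query in enumerate(queries):
--         if iq >= nQuery:
--             break
--
--         partial_data[query] = {}
--
--         iNegDoc = 0
--         iPosDoc = 0
--         for doc in data[query].keys():
--             if iPosDoc >= nPosDoc and iNegDoc >= nNegDoc:
--                 break
--
--             if iPosDoc < nPosDoc and data[query][doc][1] > 0:
--                 iPosDoc += 1
--                 partial_data[query][doc] = data[query][doc]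
--
--             if iNegDoc < nNegDoc and data[query][doc][1] <= 0:
--                 iNegDoc += 1
--                 partial_data[query][doc] = data[query][doc]
--
--     return partial_data
-- ===== SOURCE B (Python) =====
-- def _take_first(it, n):
--     taken = []
--     if n <= 0:
--         return taken
--     for x in it:
--         taken.append(x)
--         if len(taken) >= n:
--             break
--     return taken
--
--
-- def getPartData(data, nQuery, nNegDoc, nPosDoc):
--     partial_data = {}
--     for query, docs in list(data.items())[:max(0, nQuery)]:
--         pos = _take_first((d for d, v in docs.items() if v[1] > 0), nPosDoc)
--         neg = _take_first((d for d, v in docs.items() if v[1] <= 0), nNegDoc)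
--         partial_data[query] = {d: v for d, v in docs.items() if d in pos or d in neg}
--     return partial_data
-- ===== Notes on version B (the rewrite author's own statement) =====
-- stated objective: alternative
-- what changed: Replaces A's single interleaved pass with per-doc pos/neg counters and two early-break guards by a partition-then-take decomposition: lazily take the first nPosDoc positive and the first nNegDoc negative doc ids of each selected query, then keep exactly the docs whose id was taken, preserving dict order; Pre_ excludes exactly the inputs on which A raises IndexError (a selected query's loop reaches a doc whose feature list has length < 2 before both budgets are filled) - B raises on exactly the same inputs.
import Mathlib
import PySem

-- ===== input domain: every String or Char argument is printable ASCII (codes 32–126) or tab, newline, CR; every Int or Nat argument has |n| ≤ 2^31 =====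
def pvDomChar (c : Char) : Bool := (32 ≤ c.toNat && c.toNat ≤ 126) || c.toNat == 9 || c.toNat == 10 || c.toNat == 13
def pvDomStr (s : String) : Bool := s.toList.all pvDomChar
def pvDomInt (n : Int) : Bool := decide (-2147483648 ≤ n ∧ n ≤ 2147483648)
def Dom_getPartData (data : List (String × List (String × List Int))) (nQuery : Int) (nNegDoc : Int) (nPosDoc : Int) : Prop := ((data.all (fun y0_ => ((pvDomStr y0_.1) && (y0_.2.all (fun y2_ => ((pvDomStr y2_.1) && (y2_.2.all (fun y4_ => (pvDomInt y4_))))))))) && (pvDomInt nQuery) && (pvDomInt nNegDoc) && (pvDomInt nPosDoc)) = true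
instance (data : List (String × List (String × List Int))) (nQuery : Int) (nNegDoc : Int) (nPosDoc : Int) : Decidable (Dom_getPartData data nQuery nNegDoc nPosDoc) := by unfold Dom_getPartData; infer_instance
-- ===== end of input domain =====

-- B replaces A's interleaved counter-and-break pass by a partition-then-take decomposition per query; equal output (order included) on every input where A returns (Pre_ excludes exactly A's IndexError inputs, and duplicate-key assoc lists, which represent no Python dict).


-- ===== PORT A =====
-- inner loop of A over data[query].keys(), with the two counters and the break;
-- the two dict assignments target a fresh key (doc keys are unique under Pre_ and the
-- two branch conditions are mutually exclusive), so the assignment appends one entry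
def pvAInner (nNegDoc nPosDoc : Int) (ddocs : PySem.Dict String (List Int)) (docs : List String) (iNeg iPos : Int) : List (String × List Int) :=
  match docs with
  | [] => []
  | doc :: rest =>
    if iPos ≥ nPosDoc ∧ iNeg ≥ nNegDoc then []
    else
      let v := ddocs.getD doc []
      let s := (PySem.List.pyGet? v 1).getD 0   -- data[query][doc][1]; in range under Pre_ wherever this line is reached
      let iPos' := if iPos < nPosDoc ∧ s > 0 then iPos + 1 else iPos
      let iNeg' := if iNeg < nNegDoc ∧ s ≤ 0 then iNeg + 1 else iNeg
      (if (iPos < nPosDoc ∧ s > 0) ∨ (iNeg < nNegDoc ∧ s ≤ 0) then [(doc, v)] else []) ++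
        pvAInner nNegDoc nPosDoc ddocs rest iNeg' iPos'

-- outer loop of A over enumerate(data.keys()) with the break at iq >= nQuery
def pvAOuter (nQuery nNegDoc nPosDoc : Int) (dd : PySem.Dict String (List (String × List Int))) (queries : List String) (iq : Int) : List (String × List (String × List Int)) :=
  match queries with
  | [] => []
  | query :: rest =>
    if iq ≥ nQuery then []
    else
      let docs := dd.getD query []   -- data[query]
      (query, pvAInner nNegDoc nPosDoc (PySem.Dict.mk docs) (docs.map (·.1)) 0 0)
        :: pvAOuter nQuery nNegDoc nPosDoc dd rest (iq + 1)

def getPartData (data : List (String × List (String × List Int))) (nQuery : Int) (nNegDoc : Int) (nPosDoc : Int) : List (String × List (String × List Int)) :=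
  pvAOuter nQuery nNegDoc nPosDoc (PySem.Dict.mk data) (data.map (·.1)) 0

-- ===== PORT B =====
-- B's _take_first: the first n elements of the (already filtered) id list; nothing for n <= 0.
-- B consumes the generator lazily; in this pure total port only the resulting list matters.
def pvTakeFirst (l : List String) (n : Int) : List String :=
  if n ≤ 0 then [] else l.take n.toNat

-- per-query body of B: first nPosDoc positive ids, first nNegDoc negative ids, then filter
def pvPartQuery (nNegDoc nPosDoc : Int) (docs : List (String × List Int)) : List (String × List Int) :=
  let pos := pvTakeFirst ((docs.filter (fun p => decide ((PySem.List.pyGet? p.2 1).getD 0 > 0))).map (·.1)) nPosDoc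
  let neg := pvTakeFirst ((docs.filter (fun p => decide ((PySem.List.pyGet? p.2 1).getD 0 ≤ 0))).map (·.1)) nNegDoc
  docs.filter (fun p => decide (p.1 ∈ pos) || decide (p.1 ∈ neg))

def getPartData_alt (data : List (String × List (String × List Int))) (nQuery : Int) (nNegDoc : Int) (nPosDoc : Int) : List (String × List (String × List Int)) :=
  (PySem.List.slice data none (some (max 0 nQuery))).map (fun p => (p.1, pvPartQuery nNegDoc nPosDoc p.2))

-- ===== PRECONDITION & SPEC =====
-- Pre_ requires (a) unique query keys and unique doc keys per query (the inputs are Python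
-- dicts, whose keys are always unique, so assoc lists with duplicate keys represent no Python
-- input), and (b) excludes EXACTLY the inputs on which A raises IndexError at
-- data[query][doc][1]: among the first max(0,nQuery) queries, the first doc whose feature list
-- has length < 2 is reached by A's loop, i.e. the docs before it do not already contain
-- nPosDoc positives and nNegDoc non-positives (otherwise A's break fires before the access);
-- B raises on exactly the same inputs, so nothing on which A returns is excluded.
def Pre_getPartData (data : List (String × List (String × List Int))) (nQuery : Int) (nNegDoc : Int) (nPosDoc : Int) : Prop :=
  ((data.map (·.1)).Nodup ∧ ∀ p ∈ data, (p.2.map (·.1)).Nodup) ∧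
    ∀ p ∈ data.take (max 0 nQuery).toNat, ∀ i < p.2.length,
      ((p.2.take i).all (fun q => 2 ≤ q.2.length) ∧ (p.2.getD i ("", [])).2.length < 2) →
        nPosDoc ≤ (((p.2.take i).filter (fun q => decide ((PySem.List.pyGet? q.2 1).getD 0 > 0))).length : Int) ∧
        nNegDoc ≤ (((p.2.take i).filter (fun q => decide ((PySem.List.pyGet? q.2 1).getD 0 ≤ 0))).length : Int)
instance (data : List (String × List (String × List Int))) (nQuery : Int) (nNegDoc : Int) (nPosDoc : Int) : Decidable (Pre_getPartData data nQuery nNegDoc nPosDoc) := by unfold Pre_getPartData; infer_instance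

def pvWitness_getPartData : (List (String × List (String × List Int))) × Int × Int × Int :=
  ([("q1", [("d1", [7, 1]), ("d2", [7, -1]), ("d3", [7, 2])]), ("q2", [("e1", [0, 0])])], 2, 1, 1)

def Spec_getPartData (data : List (String × List (String × List Int))) (nQuery : Int) (nNegDoc : Int) (nPosDoc : Int) (out : List (String × List (String × List Int))) : Prop := out = getPartData_alt data nQuery nNegDoc nPosDoc
instance (data : List (String × List (String × List Int))) (nQuery : Int) (nNegDoc : Int) (nPosDoc : Int) (out : List (String × List (String × List Int))) : Decidable (Spec_getPartData data nQuery nNegDoc nPosDoc out) := by unfold Spec_getPartData; infer_instance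

-- ===== CLAIM (what is proved, stated in full; the proofs are below) =====
def Claim_equal_getPartData : Prop := ∀ (data : List (String × List (String × List Int))) (nQuery : Int) (nNegDoc : Int) (nPosDoc : Int), Dom_getPartData data nQuery nNegDoc nPosDoc → Pre_getPartData data nQuery nNegDoc nPosDoc → Spec_getPartData data nQuery nNegDoc nPosDoc (getPartData data nQuery nNegDoc nPosDoc)

-- ===== LEMMAS AND PROOFS =====

-- positive / negative doc ids of a query, in order
def pvPosK (docs : List (String × List Int)) : List String :=
  (docs.filter (fun p => decide ((PySem.List.pyGet? p.2 1).getD 0 > 0))).map (·.1)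
def pvNegK (docs : List (String × List Int)) : List String :=
  (docs.filter (fun p => decide ((PySem.List.pyGet? p.2 1).getD 0 ≤ 0))).map (·.1)

-- take-form of B's per-query body, with explicit remaining budgets
def pvFilt (docs : List (String × List Int)) (bp bn : Int) : List (String × List Int) :=
  docs.filter (fun p => decide (p.1 ∈ (pvPosK docs).take (max 0 bp).toNat) || decide (p.1 ∈ (pvNegK docs).take (max 0 bn).toNat))

theorem pvTakeFirst_eq (l : List String) (n : Int) : pvTakeFirst l n = l.take (max 0 n).toNat := by
  unfold pvTakeFirst
  split_ifs with h
  · have h0 : (max 0 n).toNat = 0 := by omega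
    simp [h0]
  · have h0 : (max 0 n).toNat = n.toNat := by omega
    rw [h0]

theorem pvPartQuery_eq_filt (nNeg nPos : Int) (docs : List (String × List Int)) :
    pvPartQuery nNeg nPos docs = pvFilt docs nPos nNeg := by
  unfold pvPartQuery pvFilt pvPosK pvNegK
  rw [pvTakeFirst_eq, pvTakeFirst_eq]

theorem pvPosK_subset (docs : List (String × List Int)) : ∀ x ∈ pvPosK docs, x ∈ docs.map (·.1) := by
  intro x hx
  unfold pvPosK at hx
  simp only [List.mem_map, List.mem_filter] at hx ⊢
  obtain ⟨p, ⟨hp, _⟩, rfl⟩ := hx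
  exact ⟨p, hp, rfl⟩

theorem pvNegK_subset (docs : List (String × List Int)) : ∀ x ∈ pvNegK docs, x ∈ docs.map (·.1) := by
  intro x hx
  unfold pvNegK at hx
  simp only [List.mem_map, List.mem_filter] at hx ⊢
  obtain ⟨p, ⟨hp, _⟩, rfl⟩ := hx
  exact ⟨p, hp, rfl⟩

theorem pvInner_eq (nNeg nPos : Int) (ddocs : PySem.Dict String (List Int)) :
    ∀ (docs : List (String × List Int)), (∀ p ∈ docs, ddocs.getD p.1 [] = p.2) →
    (docs.map (·.1)).Nodup → ∀ iNeg iPos,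
    pvAInner nNeg nPos ddocs (docs.map (·.1)) iNeg iPos = pvFilt docs (nPos - iPos) (nNeg - iNeg) := by
  intro docs
  induction docs with
  | nil => intro _ _ iNeg iPos; simp [pvAInner, pvFilt]
  | cons hd rest ih =>
    intro hget hnd iNeg iPos
    obtain ⟨d, v⟩ := hd
    have hdv : ddocs.getD d [] = v := hget (d, v) (List.mem_cons_self ..)
    have hdnotin : d ∉ rest.map (·.1) := by
      simp only [List.map_cons, List.nodup_cons] at hnd; exact hnd.1
    have hndr : (rest.map (·.1)).Nodup := by
      simp only [List.map_cons, List.nodup_cons] at hnd; exact hnd.2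
    have hgetr : ∀ p ∈ rest, ddocs.getD p.1 [] = p.2 := fun p hp => hget p (List.mem_cons_of_mem _ hp)
    simp only [List.map_cons, pvAInner, hdv]
    by_cases hstop : iPos ≥ nPos ∧ iNeg ≥ nNeg
    · rw [if_pos hstop]
      have h1 : max 0 (nPos - iPos) = 0 := by omega
      have h2 : max 0 (nNeg - iNeg) = 0 := by omega
      simp [pvFilt, h1, h2]
    · rw [if_neg hstop]
      by_cases hsp : (PySem.List.pyGet? v 1).getD 0 > 0
      · have hnsn : ¬ (PySem.List.pyGet? v 1).getD 0 ≤ 0 := by omega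
        have hposK : pvPosK ((d, v) :: rest) = d :: pvPosK rest := by
          simp [pvPosK, hsp]
        have hnegK : pvNegK ((d, v) :: rest) = pvNegK rest := by
          simp [pvNegK, hnsn]
        have hNP2 : ¬ (iNeg < nNeg ∧ (PySem.List.pyGet? v 1).getD 0 ≤ 0) := fun h => hnsn h.2
        by_cases hp1 : iPos < nPos
        · -- positive doc taken
          have hP1 : iPos < nPos ∧ (PySem.List.pyGet? v 1).getD 0 > 0 := ⟨hp1, hsp⟩
          rw [if_pos (Or.inl hP1), if_neg hNP2, if_pos hP1]
          rw [ih hgetr hndr iNeg (iPos + 1)]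
          unfold pvFilt
          rw [hposK, hnegK]
          have htn : (max 0 (nPos - iPos)).toNat = (max 0 (nPos - (iPos + 1))).toNat + 1 := by omega
          rw [htn, List.take_succ_cons]
          have hhead : (decide (d ∈ d :: (pvPosK rest).take (max 0 (nPos - (iPos + 1))).toNat) ||
              decide (d ∈ (pvNegK rest).take (max 0 (nNeg - iNeg)).toNat)) = true := by simp
          simp only [List.filter_cons, hhead, if_true, List.singleton_append]
          congr 1
          apply List.filter_congr
          intro p hp
          have hne : p.1 ≠ d := fun h => hdnotin (h ▸ List.mem_map_of_mem hp)
          simp [List.mem_cons, hne]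
        · -- positive budget exhausted: doc skipped
          have hcond : ¬ ((iPos < nPos ∧ (PySem.List.pyGet? v 1).getD 0 > 0) ∨
              (iNeg < nNeg ∧ (PySem.List.pyGet? v 1).getD 0 ≤ 0)) := by
            rintro (⟨h, _⟩ | ⟨_, h⟩) <;> [exact hp1 h; exact hnsn h]
          have hNP1 : ¬ (iPos < nPos ∧ (PySem.List.pyGet? v 1).getD 0 > 0) := fun h => hp1 h.1
          rw [if_neg hcond, if_neg hNP2, if_neg hNP1]
          rw [ih hgetr hndr iNeg iPos]
          unfold pvFilt
          rw [hposK, hnegK]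
          have htn : (max 0 (nPos - iPos)).toNat = 0 := by omega
          rw [htn]
          have hdneg : d ∉ (pvNegK rest).take (max 0 (nNeg - iNeg)).toNat :=
            fun h => hdnotin (pvNegK_subset rest d (List.take_subset _ _ h))
          simp [hdneg]
      · have hsn : (PySem.List.pyGet? v 1).getD 0 ≤ 0 := by omega
        have hposK : pvPosK ((d, v) :: rest) = pvPosK rest := by
          simp [pvPosK, hsp]
        have hnegK : pvNegK ((d, v) :: rest) = d :: pvNegK rest := by
          simp [pvNegK, hsn]
        have hNP1 : ¬ (iPos < nPos ∧ (PySem.List.pyGet? v 1).getD 0 > 0) := fun h => hsp h.2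
        by_cases hn1 : iNeg < nNeg
        · -- negative doc taken
          have hP2 : iNeg < nNeg ∧ (PySem.List.pyGet? v 1).getD 0 ≤ 0 := ⟨hn1, hsn⟩
          rw [if_pos (Or.inr hP2), if_pos hP2, if_neg hNP1]
          rw [ih hgetr hndr (iNeg + 1) iPos]
          unfold pvFilt
          rw [hposK, hnegK]
          have htn : (max 0 (nNeg - iNeg)).toNat = (max 0 (nNeg - (iNeg + 1))).toNat + 1 := by omega
          rw [htn, List.take_succ_cons]
          have hhead : (decide (d ∈ (pvPosK rest).take (max 0 (nPos - iPos)).toNat) ||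
              decide (d ∈ d :: (pvNegK rest).take (max 0 (nNeg - (iNeg + 1))).toNat)) = true := by simp
          simp only [List.filter_cons, hhead, if_true, List.singleton_append]
          congr 1
          apply List.filter_congr
          intro p hp
          have hne : p.1 ≠ d := fun h => hdnotin (h ▸ List.mem_map_of_mem hp)
          simp [List.mem_cons, hne]
        · -- negative budget exhausted: doc skipped
          have hcond : ¬ ((iPos < nPos ∧ (PySem.List.pyGet? v 1).getD 0 > 0) ∨
              (iNeg < nNeg ∧ (PySem.List.pyGet? v 1).getD 0 ≤ 0)) := by
            rintro (⟨_, h⟩ | ⟨h, _⟩) <;> [exact hsp h; exact hn1 h]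
          have hNP2 : ¬ (iNeg < nNeg ∧ (PySem.List.pyGet? v 1).getD 0 ≤ 0) := fun h => hn1 h.1
          rw [if_neg hcond, if_neg hNP2, if_neg hNP1]
          rw [ih hgetr hndr iNeg iPos]
          unfold pvFilt
          rw [hposK, hnegK]
          have htn : (max 0 (nNeg - iNeg)).toNat = 0 := by omega
          rw [htn]
          have hdpos : d ∉ (pvPosK rest).take (max 0 (nPos - iPos)).toNat :=
            fun h => hdnotin (pvPosK_subset rest d (List.take_subset _ _ h))
          simp [hdpos]

theorem pvOuter_eq (nQuery nNeg nPos : Int) (dd : PySem.Dict String (List (String × List Int))) :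
    ∀ (l : List (String × List (String × List Int))), (∀ p ∈ l, dd.getD p.1 [] = p.2) →
    (∀ p ∈ l, (p.2.map (·.1)).Nodup) → ∀ iq,
    pvAOuter nQuery nNeg nPos dd (l.map (·.1)) iq
      = (l.take (max 0 (nQuery - iq)).toNat).map (fun p => (p.1, pvPartQuery nNeg nPos p.2)) := by
  intro l
  induction l with
  | nil => intro _ _ iq; simp [pvAOuter]
  | cons hd rest ih =>
    intro hget hnd iq
    obtain ⟨q, docs⟩ := hd
    have hdq : dd.getD q [] = docs := hget (q, docs) (List.mem_cons_self ..)
    have hndq : (docs.map (·.1)).Nodup := hnd (q, docs) (List.mem_cons_self ..)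
    simp only [List.map_cons, pvAOuter, hdq]
    by_cases hstop : iq ≥ nQuery
    · rw [if_pos hstop]
      have h1 : (max 0 (nQuery - iq)).toNat = 0 := by omega
      simp [h1]
    · rw [if_neg hstop]
      have htn : (max 0 (nQuery - iq)).toNat = (max 0 (nQuery - (iq + 1))).toNat + 1 := by omega
      rw [htn, List.take_succ_cons, List.map_cons]
      congr 1
      · have hgetq : ∀ p ∈ docs, (PySem.Dict.mk docs).getD p.1 [] = p.2 := by
          intro p hp
          exact PySem.Dict.getD_of_mem_items (d := PySem.Dict.mk docs) (by simpa using hp) (by simpa [PySem.Dict.keys] using hndq) []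
        rw [pvInner_eq nNeg nPos (PySem.Dict.mk docs) docs hgetq hndq 0 0,
            pvPartQuery_eq_filt]
        simp
      · exact ih (fun p hp => hget p (List.mem_cons_of_mem _ hp))
            (fun p hp => hnd p (List.mem_cons_of_mem _ hp)) (iq + 1)

-- ===== VERDICT (by name: the statement is the Claim_ definition above) =====
theorem getPartData_spec : Claim_equal_getPartData := by
  intro data nQuery nNegDoc nPosDoc _ hpre
  unfold Spec_getPartData getPartData getPartData_alt
  obtain ⟨⟨hndq, hdocs⟩, -⟩ := hpre
  have hget : ∀ p ∈ data, (PySem.Dict.mk data).getD p.1 [] = p.2 := by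
    intro p hp
    exact PySem.Dict.getD_of_mem_items (d := PySem.Dict.mk data) (by simpa using hp) (by simpa [PySem.Dict.keys] using hndq) []
  rw [pvOuter_eq nQuery nNegDoc nPosDoc (PySem.Dict.mk data) data hget
      (fun p hp => hdocs p hp) 0,
      PySem.List.slice_to _ (le_max_left 0 nQuery)]
  simp
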